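-- pv_equiv track=rewrite | github.com/Emmanuelcsam/polar-bear | image_processing/analysis/hybrid_analyzer.py | is_interesting_pattern
-- ===== SOURCE A (Python) =====
-- def is_interesting_pattern(window):
--     """Check if a sequence is an interesting pattern"""
--     if len(window) < 2:
--         return False
--
--     # Check for ascending/descending
--     if all(window[i] <= window[i+1] for i in range(len(window)-1)):
--         return True
--     if all(window[i] >= window[i+1] for i in range(len(window)-1)):
--         return True
--
--     # Check for alternating
--     if all(window[i] < window[i+1] if i % 2 == 0 else window[i] > window[i+1]
--            for i in range(len(window)-1)):
--         return True
--
--     # Check for periodic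
--     if len(set(window[::2])) == 1 and len(set(window[1::2])) == 1:
--         return True
--
--     return False
-- ===== SOURCE B (Python) =====
-- def is_interesting_pattern(window):
--     """Single fused pass maintaining four flags instead of four separate scans."""
--     if len(window) < 2:
--         return False
--     a0, a1 = window[0], window[1]
--     asc = desc = alt = per = True
--     for i in range(len(window) - 1):
--         asc = asc and window[i] <= window[i + 1]
--         desc = desc and window[i] >= window[i + 1]
--         alt = alt and (window[i] < window[i + 1] if i % 2 == 0 else window[i] > window[i + 1])
--         per = per and window[i + 1] == (a0 if (i + 1) % 2 == 0 else a1)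
--     return asc or desc or alt or per
-- ===== Notes on version B (the rewrite author's own statement) =====
-- stated objective: alternative
-- what changed: Replaces A's four sequential scans (three all() generator passes plus two set() constructions over strided slices) with a single fused pass that maintains four boolean flags (ascending, descending, alternating, periodic-vs-window[0]/window[1]) and returns their disjunction.
import Mathlib
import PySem

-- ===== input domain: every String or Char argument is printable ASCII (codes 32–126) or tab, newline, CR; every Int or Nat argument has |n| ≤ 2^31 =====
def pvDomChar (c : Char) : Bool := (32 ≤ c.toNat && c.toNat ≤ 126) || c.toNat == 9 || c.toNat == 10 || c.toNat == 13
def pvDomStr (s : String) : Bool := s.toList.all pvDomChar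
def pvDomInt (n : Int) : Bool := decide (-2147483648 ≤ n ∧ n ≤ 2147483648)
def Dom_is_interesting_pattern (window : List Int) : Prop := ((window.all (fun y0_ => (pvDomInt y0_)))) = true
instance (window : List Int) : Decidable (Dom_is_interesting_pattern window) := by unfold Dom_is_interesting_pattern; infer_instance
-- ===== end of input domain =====

-- B fuses A's four sequential scans into one loop of flags; equivalence is proved for all inputs (A is total).

-- ===== PORT A =====
def is_interesting_pattern (window : List Int) : Bool :=
  if window.length < 2 then false
  else if (PySem.List.pyRange 0 ((window.length : Int) - 1) 1).all
      (fun i => decide (PySem.List.pyGetD window i 0 ≤ PySem.List.pyGetD window (i+1) 0)) then true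
  else if (PySem.List.pyRange 0 ((window.length : Int) - 1) 1).all
      (fun i => decide (PySem.List.pyGetD window i 0 ≥ PySem.List.pyGetD window (i+1) 0)) then true
  else if (PySem.List.pyRange 0 ((window.length : Int) - 1) 1).all
      (fun i => if PySem.Int.mod i 2 == 0 then decide (PySem.List.pyGetD window i 0 < PySem.List.pyGetD window (i+1) 0)
                else decide (PySem.List.pyGetD window i 0 > PySem.List.pyGetD window (i+1) 0)) then true
  else if (PySem.Set.len (PySem.Set.ofList ((PySem.List.slice? window none none 2).getD [])) == (1:Int))
       && (PySem.Set.len (PySem.Set.ofList ((PySem.List.slice? window (some 1) none 2).getD [])) == (1:Int)) then true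
  else false

-- ===== PORT B =====
def is_interesting_pattern_alt (window : List Int) : Bool :=
  if window.length < 2 then false
  else
    let a0 := PySem.List.pyGetD window 0 0
    let a1 := PySem.List.pyGetD window 1 0
    let r := (PySem.List.pyRange 0 ((window.length : Int) - 1) 1).foldl
      (fun (st : Bool × Bool × Bool × Bool) i =>
        (st.1 && decide (PySem.List.pyGetD window i 0 ≤ PySem.List.pyGetD window (i+1) 0),
         st.2.1 && decide (PySem.List.pyGetD window i 0 ≥ PySem.List.pyGetD window (i+1) 0),
         st.2.2.1 && (if PySem.Int.mod i 2 == 0 then decide (PySem.List.pyGetD window i 0 < PySem.List.pyGetD window (i+1) 0)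
                      else decide (PySem.List.pyGetD window i 0 > PySem.List.pyGetD window (i+1) 0)),
         st.2.2.2 && (if PySem.Int.mod (i+1) 2 == 0 then PySem.List.pyGetD window (i+1) 0 == a0
                      else PySem.List.pyGetD window (i+1) 0 == a1)))
      (true, true, true, true)
    r.1 || r.2.1 || r.2.2.1 || r.2.2.2

-- ===== PRECONDITION & SPEC =====
def Spec_is_interesting_pattern (window : List Int) (out : Bool) : Prop := out = is_interesting_pattern_alt window
instance (window : List Int) (out : Bool) : Decidable (Spec_is_interesting_pattern window out) := by unfold Spec_is_interesting_pattern; infer_instance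

-- ===== CLAIM (what is proved, stated in full; the proofs are below) =====
def Claim_equal_is_interesting_pattern : Prop := ∀ (window : List Int), Dom_is_interesting_pattern window → Spec_is_interesting_pattern window (is_interesting_pattern window)

-- ===== LEMMAS AND PROOFS =====

-- B's fold of four flag updates computes the four `all`s componentwise.
theorem fold4_eq_all (l : List Int) (f1 f2 f3 f4 : Int → Bool) (b1 b2 b3 b4 : Bool) :
    l.foldl (fun (st : Bool × Bool × Bool × Bool) i =>
      (st.1 && f1 i, st.2.1 && f2 i, st.2.2.1 && f3 i, st.2.2.2 && f4 i)) (b1, b2, b3, b4)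
    = (b1 && l.all f1, b2 && l.all f2, b3 && l.all f3, b4 && l.all f4) := by
  induction l generalizing b1 b2 b3 b4 with
  | nil => simp
  | cons a t ih => simp [List.foldl_cons, ih, Bool.and_assoc]

-- window[::2] is the even-index elements, as a map over indices.
theorem slice2_even (w : List Int) :
    PySem.List.slice? w none none 2
      = some ((List.range ((w.length + 1) / 2)).map (fun k => w.getD (2 * k) 0)) := by
  simp only [PySem.List.slice?, PySem.List.sliceIndices]
  norm_num
  have hc : (if 0 < w.length then (((w.length : Int) + 2 - 1) / 2).toNat else 0) = (w.length + 1) / 2 := by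
    split <;> omega
  rw [hc, List.filterMap_congr (g := fun k => some (w.getD (2 * k) 0)) ?_]
  · simp
  · intro x hx
    rw [List.mem_range] at hx
    have h2 : (2 * (x : Int)).toNat = 2 * x := by omega
    have hlt : 2 * x < w.length := by omega
    simp [h2, List.getElem?_eq_getElem hlt]

-- window[1::2] is the odd-index elements, as a map over indices.
theorem slice2_odd (w : List Int) :
    PySem.List.slice? w (some 1) none 2
      = some ((List.range (w.length / 2)).map (fun k => w.getD (2 * k + 1) 0)) := by
  simp only [PySem.List.slice?, PySem.List.sliceIndices]
  norm_num
  have hs : min 1 (w.length : Int) = if 0 < w.length then 1 else 0 := by split <;> omega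
  rw [hs]
  split
  case isTrue hp =>
    have hc : (if 1 < w.length then (((w.length : Int) - 1 + 2 - 1) / 2).toNat else 0) = w.length / 2 := by
      split <;> omega
    rw [hc, List.filterMap_congr (g := fun k => some (w.getD (2 * k + 1) 0)) ?_]
    · simp
    · intro x hx
      rw [List.mem_range] at hx
      have h2 : (1 + 2 * (x : Int)).toNat = 2 * x + 1 := by omega
      have hlt : 2 * x + 1 < w.length := by omega
      simp [h2, List.getElem?_eq_getElem hlt]
  case isFalse hp =>
    have hl : w.length = 0 := by omega
    simp [hl]

-- len(set(a :: l)) == 1 iff every element of l equals a.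
theorem set_len_one (a : Int) (l : List Int) :
    (PySem.Set.len (PySem.Set.ofList (a :: l)) == (1 : Int)) = l.all (fun x => x == a) := by
  rw [Bool.eq_iff_iff]
  simp only [PySem.Set.len, beq_iff_eq, List.all_eq_true]
  have hmem := PySem.Set.mem_ofList (a :: l)
  have hnd := PySem.Set.nodup_ofList (a :: l)
  constructor
  · intro h1 x hx
    obtain ⟨y, hy⟩ := List.length_eq_one_iff.mp (by exact_mod_cast h1)
    have ha : a = y := by
      have := (hmem a).mpr (by simp)
      simpa [hy] using this
    have hxy : x = y := by
      have := (hmem x).mpr (by simp [hx])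
      simpa [hy] using this
    simp [hxy, ha]
  · intro h
    have hsub : PySem.Set.ofList (a :: l) ⊆ [a] := by
      intro x hx
      have := (hmem x).mp hx
      rcases List.mem_cons.mp this with h' | h'
      · simp [h']
      · simp [h x h']
    have hle : (PySem.Set.ofList (a :: l)).length ≤ 1 := by
      simpa using List.Subperm.length_le (List.subperm_of_subset hnd hsub)
    have hge : 1 ≤ (PySem.Set.ofList (a :: l)).length := by
      have := (hmem a).mpr (by simp)
      exact List.length_pos_of_mem this
    omega

theorem modc (m : Nat) : PySem.Int.mod ((m : Int)) 2 = ((m % 2 : Nat) : Int) := by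
  exact_mod_cast PySem.Int.mod_natCast m 2

theorem periodic_eq (w : List Int) (h2 : 2 ≤ w.length) :
    ((PySem.Set.len (PySem.Set.ofList ((PySem.List.slice? w none none 2).getD [])) == (1:Int))
      && (PySem.Set.len (PySem.Set.ofList ((PySem.List.slice? w (some 1) none 2).getD [])) == (1:Int)))
    = (PySem.List.pyRange 0 ((w.length : Int) - 1) 1).all
        (fun i => if PySem.Int.mod (i+1) 2 == 0 then PySem.List.pyGetD w (i+1) 0 == PySem.List.pyGetD w 0 0
                  else PySem.List.pyGetD w (i+1) 0 == PySem.List.pyGetD w 1 0) := by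
  rw [slice2_even, slice2_odd]
  -- peel the head element off each strided slice
  have he : (w.length + 1) / 2 = ((w.length + 1) / 2 - 1) + 1 := by omega
  have ho : w.length / 2 = (w.length / 2 - 1) + 1 := by omega
  rw [he, ho, List.range_succ_eq_map, List.range_succ_eq_map]
  simp only [List.map_cons, List.map_map, Option.getD_some, Nat.mul_zero]
  rw [set_len_one, set_len_one, PySem.List.pyRange_one]
  have hn : ((w.length : Int) - 1 - 0).toNat = w.length - 1 := by omega
  rw [hn]
  rw [List.all_map, List.all_map, List.all_map, Bool.eq_iff_iff]
  simp only [Bool.and_eq_true, List.all_eq_true, List.mem_range, Function.comp, beq_iff_eq]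
  constructor
  · rintro ⟨hev, hod⟩ j hj
    have hc : (0:Int) + (j:Int) + 1 = ((j + 1 : Nat) : Int) := by push_cast; ring
    rw [hc, modc, PySem.List.pyGetD_natCast]
    have ha0 : PySem.List.pyGetD w 0 0 = w.getD 0 0 := by
      simpa using PySem.List.pyGetD_natCast w 0 0
    have ha1 : PySem.List.pyGetD w 1 0 = w.getD 1 0 := by
      simpa using PySem.List.pyGetD_natCast w 1 0
    rw [ha0, ha1]
    by_cases hp : (j + 1) % 2 = 0
    · have hk := hev ((j + 1) / 2 - 1) (by omega)
      simp only [hp, Nat.cast_zero]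
      simpa [Nat.succ_eq_add_one, show ((j + 1) / 2 - 1) + 1 = (j + 1) / 2 from by omega,
             show 2 * ((j + 1) / 2) = j + 1 from by omega] using hk
    · simp only [Nat.cast_eq_zero, hp, if_false, beq_iff_eq]
      by_cases hj0 : j = 0
      · simp [hj0]
      · have hk := hod ((j - 2) / 2) (by omega)
        simpa [Nat.succ_eq_add_one, show 2 * ((j - 2) / 2 + 1) + 1 = j + 1 from by omega] using hk
  · intro h
    have ha0 : PySem.List.pyGetD w 0 0 = w.getD 0 0 := by
      simpa using PySem.List.pyGetD_natCast w 0 0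
    have ha1 : PySem.List.pyGetD w 1 0 = w.getD 1 0 := by
      simpa using PySem.List.pyGetD_natCast w 1 0
    constructor
    · intro k hk
      have hx := h (2 * k + 1) (by omega)
      have hc : (0:Int) + ((2 * k + 1 : Nat) : Int) + 1 = ((2 * k + 2 : Nat) : Int) := by
        push_cast; ring
      rw [hc, modc, PySem.List.pyGetD_natCast, ha0, ha1] at hx
      have hp : (2 * k + 2) % 2 = 0 := by omega
      simp only [hp, Nat.cast_zero] at hx
      simpa [Nat.succ_eq_add_one, show 2 * (k + 1) = 2 * k + 2 from by ring] using hx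
    · intro k hk
      have hx := h (2 * k + 2) (by omega)
      have hc : (0:Int) + ((2 * k + 2 : Nat) : Int) + 1 = ((2 * k + 3 : Nat) : Int) := by
        push_cast; ring
      rw [hc, modc, PySem.List.pyGetD_natCast, ha0, ha1] at hx
      have hp : ¬ ((2 * k + 3) % 2 = 0) := by omega
      simp only [Nat.cast_eq_zero, hp, if_false, beq_iff_eq] at hx
      simpa [Nat.succ_eq_add_one, show 2 * (k + 1) + 1 = 2 * k + 3 from by ring] using hx


-- ===== VERDICT (by name: the statement is the Claim_ definition above) =====
theorem ifchain_eq_or (c1 c2 c3 c4 : Bool) :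
    (if c1 then true else if c2 then true else if c3 then true else if c4 then true else false)
    = (c1 || c2 || c3 || c4) := by
  cases c1 <;> cases c2 <;> cases c3 <;> cases c4 <;> rfl

-- ===== VERDICT (by name: the statement is the Claim_ definition above) =====
theorem is_interesting_pattern_spec : Claim_equal_is_interesting_pattern := by
  intro w _
  unfold Spec_is_interesting_pattern is_interesting_pattern is_interesting_pattern_alt
  by_cases h : w.length < 2
  · simp [h]
  · simp only [h, if_false]
    rw [fold4_eq_all, periodic_eq w (by omega)]
    simp only [Bool.true_and]
    exact ifchain_eq_or _ _ _ _
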